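-- pv_equiv track=rewrite | github.com/EMpTy2003/Practice | diff.py | max_diff
-- ===== SOURCE A (Python) =====
-- def max_diff(arr, n):
--     subset_sum_1 = 0
--     subset_sum_2 = 0
--
--     for i in range(n):
--         is_single_occurrence = True
--
--         for j in range(i + 1, n):
--             if arr[i] == arr[j]:
--                 is_single_occurrence = False
--                 arr[i] = arr[j] = 0
--                 break
--
--         if is_single_occurrence:
--             if arr[i] > 0:
--                 subset_sum_1 += arr[i]
--             else:
--                 subset_sum_2 += arr[i]
--
--     return abs(subset_sum_1 - subset_sum_2)
-- ===== SOURCE B (Python) =====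
-- def max_diff(arr, n):
--     counts = {}
--     for i in range(n):
--         x = arr[i]
--         counts[x] = counts.get(x, 0) + 1
--     return sum(abs(v) for v, c in counts.items() if c % 2 == 1)
-- ===== Notes on version B (the rewrite author's own statement) =====
-- stated objective: faster
-- what changed: Replaced the quadratic pair-and-zero scan (which mutates arr) with a single counting pass and a parity sum of absolute values over a dict, using that paired-off values cancel and zeroed slots never affect the sums.
import Mathlib
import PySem

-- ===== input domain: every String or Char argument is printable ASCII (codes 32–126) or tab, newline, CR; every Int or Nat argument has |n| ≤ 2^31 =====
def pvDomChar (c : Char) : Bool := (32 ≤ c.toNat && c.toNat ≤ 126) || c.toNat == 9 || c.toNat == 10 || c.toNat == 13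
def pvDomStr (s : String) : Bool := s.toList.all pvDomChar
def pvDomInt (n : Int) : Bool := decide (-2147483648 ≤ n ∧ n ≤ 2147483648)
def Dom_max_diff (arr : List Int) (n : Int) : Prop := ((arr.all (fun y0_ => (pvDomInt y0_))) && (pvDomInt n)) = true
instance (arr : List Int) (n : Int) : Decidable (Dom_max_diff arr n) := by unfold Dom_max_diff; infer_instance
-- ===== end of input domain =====

-- B replaces A's quadratic pair-and-zero scan with one counting pass plus a parity
-- sum of absolute values (objective: faster). Python A mutates arr in place (zeroes
-- paired entries); B does not — the equivalence proved is about the RETURN value only.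

-- ===== PORT A =====
-- inner loop 'for j in range(i+1, n): if arr[i] == arr[j]: arr[i] = arr[j] = 0; break'
-- (pyGetD/pySetD totalize arr[i]/arr[j]; Pre_ keeps every index used in range)
def maxDiffInner (a : List Int) (i : Int) : List Int → List Int × Bool
  | [] => (a, true)
  | j :: js =>
      if PySem.List.pyGetD a i 0 == PySem.List.pyGetD a j 0 then
        (PySem.List.pySetD (PySem.List.pySetD a i 0) j 0, false)
      else maxDiffInner a i js

def max_diff (arr : List Int) (n : Int) : Int :=
  let st := (PySem.List.pyRange 0 n 1).foldl
    (fun (st : List Int × Int × Int) i =>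
      let r := maxDiffInner st.1 i (PySem.List.pyRange (i + 1) n 1)
      let a := r.1
      if r.2 then
        if PySem.List.pyGetD a i 0 > 0 then (a, st.2.1 + PySem.List.pyGetD a i 0, st.2.2)
        else (a, st.2.1, st.2.2 + PySem.List.pyGetD a i 0)
      else (a, st.2.1, st.2.2)) (arr, 0, 0)
  |st.2.1 - st.2.2|

-- ===== PORT B =====
def max_diff_alt (arr : List Int) (n : Int) : Int :=
  let counts := (PySem.List.pyRange 0 n 1).foldl
    (fun (d : PySem.Dict Int Int) i =>
      let x := PySem.List.pyGetD arr i 0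
      d.insert x (d.getD x 0 + 1)) PySem.Dict.empty
  counts.items.foldl (fun acc p => if p.2 % 2 == 1 then acc + |p.1| else acc) 0

-- ===== PRECONDITION & SPEC =====
-- Pre_ excludes exactly the inputs where Python A raises IndexError: n > len(arr).
def Pre_max_diff (arr : List Int) (n : Int) : Prop := n ≤ (arr.length : Int)
instance (arr : List Int) (n : Int) : Decidable (Pre_max_diff arr n) := by unfold Pre_max_diff; infer_instance
def pvWitness_max_diff : List Int × Int := ([3, -1, 3, 2], 4)

def Spec_max_diff (arr : List Int) (n : Int) (out : Int) : Prop := out = max_diff_alt arr n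
instance (arr : List Int) (n : Int) (out : Int) : Decidable (Spec_max_diff arr n out) := by unfold Spec_max_diff; infer_instance

-- ===== CLAIM (what is proved, stated in full; the proofs are below) =====
def Claim_equal_max_diff : Prop := ∀ (arr : List Int) (n : Int), Dom_max_diff arr n → Pre_max_diff arr n → Spec_max_diff arr n (max_diff arr n)

-- ===== LEMMAS AND PROOFS =====

-- replace the first occurrence of x by 0
def zeroFirst (x : Int) : List Int → List Int
  | [] => []
  | y :: l => if y = x then 0 :: l else y :: zeroFirst x l

theorem length_zeroFirst (x : Int) (l : List Int) : (zeroFirst x l).length = l.length := by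
  induction l with
  | nil => rfl
  | cons y l ih => simp only [zeroFirst]; split <;> simp [ih]

-- A's value, structurally: the head pairs with its first later equal (both zeroed), else contributes |·|
def pairOff : List Int → Int
  | [] => 0
  | x :: l => if x ∈ l then pairOff (zeroFirst x l) else |x| + pairOff l
termination_by l => l.length
decreasing_by all_goals (simp only [length_zeroFirst, List.length_cons]; omega)

-- the common mathematical value: sum of |v| over values with odd multiplicity
def oddSum (l : List Int) : Int := ∑ v ∈ l.toFinset, (if l.count v % 2 = 1 then |v| else 0)

theorem count_zeroFirst (x v : Int) (l : List Int) (h : x ∈ l) :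
    (zeroFirst x l).count v + (if v = x then 1 else 0) = l.count v + (if v = (0:Int) then 1 else 0) := by
  induction l with
  | nil => cases h
  | cons y l ih =>
      by_cases hyx : y = x
      · subst hyx
        simp only [zeroFirst, ite_true]
        simp only [List.count_cons, beq_iff_eq]
        split_ifs <;> omega
      · have hx : x ∈ l := by cases h with | head => exact absurd rfl hyx | tail _ h => exact h
        have H := ih hx
        simp only [zeroFirst, if_neg hyx, List.count_cons, beq_iff_eq]
        split_ifs at H ⊢ <;> omega

theorem oddSum_extend (l : List Int) (U : Finset Int) (hU : l.toFinset ⊆ U) :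
    oddSum l = ∑ v ∈ U, (if l.count v % 2 = 1 then |v| else 0) := by
  unfold oddSum
  refine Finset.sum_subset hU (fun v _ hv => ?_)
  have hv' : v ∉ l := by simpa using hv
  simp [List.count_eq_zero.mpr hv']

theorem oddSum_parity (l₁ l₂ : List Int)
    (h : ∀ v : Int, v ≠ 0 → l₁.count v % 2 = l₂.count v % 2) : oddSum l₁ = oddSum l₂ := by
  rw [oddSum_extend l₁ (l₁.toFinset ∪ l₂.toFinset) Finset.subset_union_left,
      oddSum_extend l₂ (l₁.toFinset ∪ l₂.toFinset) Finset.subset_union_right]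
  refine Finset.sum_congr rfl (fun v _ => ?_)
  by_cases hv : v = 0
  · subst hv; simp
  · rw [h v hv]

theorem oddSum_cons_not_mem (x : Int) (l : List Int) (h : x ∉ l) :
    oddSum (x :: l) = |x| + oddSum l := by
  unfold oddSum
  have hx : x ∉ l.toFinset := by simpa using h
  rw [List.toFinset_cons, Finset.sum_insert hx]
  have h1 : (x :: l).count x = 1 := by
    simp [List.count_eq_zero.mpr h]
  rw [h1]
  simp only [show (1 : Nat) % 2 = 1 from rfl]
  congr 1
  refine Finset.sum_congr rfl (fun v hv => ?_)
  have hvx : v ≠ x := by rintro rfl; exact hx hv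
  have : (x :: l).count v = l.count v := by
    simp [show ¬(x = v) from fun e => hvx e.symm]
  rw [this]

theorem pairOff_eq_oddSum (l : List Int) : pairOff l = oddSum l := by
  fun_induction pairOff l with
  | case1 => simp [oddSum]
  | case2 x l hmem ih =>
      have key : ∀ v : Int, v ≠ 0 → (x :: l).count v % 2 = (zeroFirst x l).count v % 2 := by
        intro v hv
        have H := count_zeroFirst x v l hmem
        simp only [List.count_cons, beq_iff_eq] at H ⊢
        split_ifs at H ⊢ <;> omega
      rw [ih]
      exact (oddSum_parity (x :: l) (zeroFirst x l) key).symm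
  | case3 x l hmem ih =>
      rw [ih, oddSum_cons_not_mem x l hmem]

theorem pairOff_nonneg (l : List Int) : 0 ≤ pairOff l := by
  fun_induction pairOff l with
  | case1 => simp
  | case2 x l hmem ih => exact ih
  | case3 x l hmem ih =>
      have := abs_nonneg x
      omega

-- zeroing the first matching index IS zeroFirst
theorem set_eq_zeroFirst (x : Int) (l : List Int) (p : Nat) (hp : p < l.length)
    (hx : l[p] = x) (hfirst : ∀ q, (hq : q < p) → l[q]'(by omega) ≠ x) :
    l.set p 0 = zeroFirst x l := by
  induction l generalizing p with
  | nil => simp at hp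
  | cons y t ih =>
      cases p with
      | zero => simp_all [zeroFirst]
      | succ p =>
          have hy : y ≠ x := by
            have := hfirst 0 (Nat.succ_pos p)
            simpa using this
          simp only [List.set_cons_succ, zeroFirst, if_neg hy, List.cons.injEq, true_and]
          exact ih p (by simpa using hp) (by simpa using hx)
            (fun q hq => by have := hfirst (q+1) (by omega); simpa using this)

theorem innerA_spec (a : List Int) (n i : Int) (hi : 0 ≤ i) (hn : n ≤ (a.length : Int)) :
    ∀ (k : Nat) (j : Int), i < j → j + k = n →
      ((PySem.List.pyGetD a i 0 ∉ (a.take n.toNat).drop j.toNat →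
          maxDiffInner a i (PySem.List.pyRange j n 1) = (a, true)) ∧
       (PySem.List.pyGetD a i 0 ∈ (a.take n.toNat).drop j.toNat →
          ∃ jf : Nat, j.toNat ≤ jf ∧ jf < n.toNat ∧
            a[jf]? = some (PySem.List.pyGetD a i 0) ∧
            (∀ q, j.toNat ≤ q → q < jf → a[q]? ≠ some (PySem.List.pyGetD a i 0)) ∧
            maxDiffInner a i (PySem.List.pyRange j n 1) = ((a.set i.toNat 0).set jf 0, false))) := by
  intro k
  induction k with
  | zero =>
      intro j hij hjk
      rw [PySem.List.pyRange_one_eq_nil (by omega)]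
      have hnil : (a.take n.toNat).drop j.toNat = [] := by
        apply List.drop_eq_nil_of_le
        simp only [List.length_take]
        omega
      refine ⟨fun _ => rfl, fun hmem => ?_⟩
      rw [hnil] at hmem
      cases hmem
  | succ k ih =>
      intro j hij hjk
      have hjn : j < n := by omega
      have hj0 : 0 ≤ j := by omega
      have hja : j.toNat < a.length := by omega
      have hlen : j.toNat < (a.take n.toNat).length := by
        simp only [List.length_take]; omega
      have hseg : (a.take n.toNat).drop j.toNat
          = a[j.toNat] :: (a.take n.toNat).drop (j.toNat + 1) := by
        rw [List.drop_eq_getElem_cons hlen, List.getElem_take]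
      have hgj : PySem.List.pyGetD a j 0 = a[j.toNat] := by
        rw [PySem.List.pyGetD_eq_getElem a 0 hj0 (by omega)]
      rw [PySem.List.pyRange_one_cons hjn]
      simp only [maxDiffInner, hgj]
      by_cases he : PySem.List.pyGetD a i 0 = a[j.toNat]
      · rw [if_pos (by simpa using he)]
        constructor
        · intro hnm
          exfalso
          exact hnm (by rw [hseg, he]; exact List.mem_cons_self)
        · intro _
          refine ⟨j.toNat, le_refl _, by omega, ?_, ?_, ?_⟩
          · rw [List.getElem?_eq_getElem hja, he]
          · intro q hq1 hq2; omega
          · rw [PySem.List.pySetD_of_nonneg _ _ (by omega : (0:Int) ≤ i),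
                PySem.List.pySetD_of_nonneg _ _ hj0]
      · rw [if_neg (by simpa using he)]
        have IH := ih (j + 1) (by omega) (by omega)
        have htn : (j + 1).toNat = j.toNat + 1 := by omega
        rw [htn] at IH
        constructor
        · intro hnm
          refine IH.1 (fun hm => hnm ?_)
          rw [hseg]
          exact List.mem_cons_of_mem _ hm
        · intro hmem
          have hm' : PySem.List.pyGetD a i 0 ∈ (a.take n.toNat).drop (j.toNat + 1) := by
            rw [hseg] at hmem
            rcases List.mem_cons.mp hmem with h | h
            · exact absurd h (by simpa using he)
            · exact h
          obtain ⟨jf, h1, h2, h3, h4, h5⟩ := IH.2 hm'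
          refine ⟨jf, by omega, h2, h3, ?_, h5⟩
          intro q hq1 hq2
          by_cases hqj : q = j.toNat
          · subst hqj
            rw [List.getElem?_eq_getElem hja]
            intro hc
            exact he (by injection hc with h; exact h.symm)
          · exact h4 q (by omega) hq2

theorem outerA_spec (n : Int) (hn0 : 0 ≤ n) :
    ∀ (k : Nat) (i : Int) (a : List Int) (s1 s2 : Int), 0 ≤ i → i + k = n → n ≤ (a.length : Int) →
      (((PySem.List.pyRange i n 1).foldl
        (fun (st : List Int × Int × Int) i =>
          if (maxDiffInner st.1 i (PySem.List.pyRange (i + 1) n 1)).2 = true then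
            if PySem.List.pyGetD (maxDiffInner st.1 i (PySem.List.pyRange (i + 1) n 1)).1 i 0 > 0 then
              ((maxDiffInner st.1 i (PySem.List.pyRange (i + 1) n 1)).1,
                st.2.1 + PySem.List.pyGetD (maxDiffInner st.1 i (PySem.List.pyRange (i + 1) n 1)).1 i 0, st.2.2)
            else
              ((maxDiffInner st.1 i (PySem.List.pyRange (i + 1) n 1)).1, st.2.1,
                st.2.2 + PySem.List.pyGetD (maxDiffInner st.1 i (PySem.List.pyRange (i + 1) n 1)).1 i 0)
          else ((maxDiffInner st.1 i (PySem.List.pyRange (i + 1) n 1)).1, st.2.1, st.2.2)) (a, s1, s2)).2.1 -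
       ((PySem.List.pyRange i n 1).foldl
        (fun (st : List Int × Int × Int) i =>
          if (maxDiffInner st.1 i (PySem.List.pyRange (i + 1) n 1)).2 = true then
            if PySem.List.pyGetD (maxDiffInner st.1 i (PySem.List.pyRange (i + 1) n 1)).1 i 0 > 0 then
              ((maxDiffInner st.1 i (PySem.List.pyRange (i + 1) n 1)).1,
                st.2.1 + PySem.List.pyGetD (maxDiffInner st.1 i (PySem.List.pyRange (i + 1) n 1)).1 i 0, st.2.2)
            else
              ((maxDiffInner st.1 i (PySem.List.pyRange (i + 1) n 1)).1, st.2.1,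
                st.2.2 + PySem.List.pyGetD (maxDiffInner st.1 i (PySem.List.pyRange (i + 1) n 1)).1 i 0)
          else ((maxDiffInner st.1 i (PySem.List.pyRange (i + 1) n 1)).1, st.2.1, st.2.2)) (a, s1, s2)).2.2) =
      (s1 - s2) + pairOff ((a.take n.toNat).drop i.toNat) := by
  intro k
  induction k with
  | zero =>
      intro i a s1 s2 hi hik hlen
      rw [PySem.List.pyRange_one_eq_nil (by omega)]
      have hnil : (a.take n.toNat).drop i.toNat = [] := by
        apply List.drop_eq_nil_of_le
        simp only [List.length_take]; omega
      simp [hnil, pairOff]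
  | succ k ih =>
      intro i a s1 s2 hi hik hlen
      have hin : i < n := by omega
      have hia : i.toNat < a.length := by omega
      have hx : PySem.List.pyGetD a i 0 = a[i.toNat] := by
        rw [PySem.List.pyGetD_eq_getElem a 0 hi (by omega)]
      have hlent : i.toNat < (a.take n.toNat).length := by
        simp only [List.length_take]; omega
      have hsegd : (a.take n.toNat).drop i.toNat
          = a[i.toNat] :: (a.take n.toNat).drop (i.toNat + 1) := by
        rw [List.drop_eq_getElem_cons hlent, List.getElem_take]
      have hI := innerA_spec a n i hi hlen k (i + 1) (by omega) (by omega)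
      have ht1 : (i + 1).toNat = i.toNat + 1 := by omega
      rw [ht1] at hI
      rw [PySem.List.pyRange_one_cons hin, List.foldl_cons]
      by_cases hmem : PySem.List.pyGetD a i 0 ∈ (a.take n.toNat).drop (i.toNat + 1)
      · obtain ⟨jf, h1, h2, h3, h4, h5⟩ := hI.2 hmem
        simp only [h5, Bool.false_eq_true, if_false]
        have ihA := ih (i + 1) ((a.set i.toNat 0).set jf 0) s1 s2 (by omega) (by omega)
          (by simp only [List.length_set]; exact hlen)
        rw [ht1] at ihA
        rw [ihA]
        have hjfa : jf < a.length := by omega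
        have hxjf : a[jf] = PySem.List.pyGetD a i 0 := by
          have := List.getElem?_eq_getElem hjfa (l := a)
          rw [this] at h3
          exact Option.some.inj h3
        have hE : ((((a.set i.toNat 0).set jf 0).take n.toNat).drop (i.toNat + 1))
            = zeroFirst (PySem.List.pyGetD a i 0) ((a.take n.toNat).drop (i.toNat + 1)) := by
          rw [List.take_set, List.take_set]
          rw [List.drop_set, if_neg (by omega)]
          rw [List.drop_set, if_pos (by omega)]
          have hplen : jf - (i.toNat + 1) < ((a.take n.toNat).drop (i.toNat + 1)).length := by
            simp only [List.length_drop, List.length_take]; omega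
          refine set_eq_zeroFirst _ _ _ hplen ?_ ?_
          · simp only [List.getElem_drop, List.getElem_take]
            have hj' : i.toNat + 1 + (jf - (i.toNat + 1)) = jf := by omega
            simp only [hj']
            exact hxjf
          · intro q hq
            simp only [List.getElem_drop, List.getElem_take]
            have h4' := h4 (i.toNat + 1 + q) (by omega) (by omega)
            intro hc
            exact h4' (by rw [List.getElem?_eq_getElem (by omega)]; rw [hc])
        rw [hE]
        rw [hsegd, pairOff, if_pos (hx ▸ hmem), hx]
      · have hI1 := hI.1 hmem
        simp only [hI1, if_true]
        have hnm : a[i.toNat] ∉ (a.take n.toNat).drop (i.toNat + 1) := hx ▸ hmem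
        by_cases hpos : PySem.List.pyGetD a i 0 > 0
        · rw [if_pos hpos]
          have ihA := ih (i + 1) a (s1 + PySem.List.pyGetD a i 0) s2 (by omega) (by omega) hlen
          rw [ht1] at ihA
          rw [ihA, hsegd, pairOff, if_neg hnm, hx]
          have : |a[i.toNat]| = a[i.toNat] := abs_of_pos (by rw [← hx]; omega)
          omega
        · rw [if_neg hpos]
          have ihA := ih (i + 1) a s1 (s2 + PySem.List.pyGetD a i 0) (by omega) (by omega) hlen
          rw [ht1] at ihA
          rw [ihA, hsegd, pairOff, if_neg hnm, hx]
          have : |a[i.toNat]| = -a[i.toNat] := abs_of_nonpos (by rw [← hx]; omega)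
          omega

theorem max_diff_eq_pairOff (arr : List Int) (n : Int) (h : n ≤ (arr.length : Int)) :
    max_diff arr n = pairOff (arr.take n.toNat) := by
  by_cases hn : n ≤ 0
  · unfold max_diff
    rw [PySem.List.pyRange_one_eq_nil hn]
    simp [Int.toNat_of_nonpos hn, pairOff]
  · rw [not_le] at hn
    have H := outerA_spec n (by omega) n.toNat 0 arr 0 0 (le_refl 0) (by omega) h
    have hnn := pairOff_nonneg (arr.take n.toNat)
    simp only [max_diff]
    rw [H]
    rw [show ((0:Int).toNat) = 0 from rfl, List.drop_zero]
    rw [show (0:Int) - 0 + pairOff (arr.take n.toNat) = pairOff (arr.take n.toNat) by ring]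
    exact abs_of_nonneg hnn

theorem intmod2 (c : Nat) : (((c : Int) % 2 == 1) : Bool) = decide (c % 2 = 1) := by
  by_cases h : c % 2 = 1 <;> simp [h] <;> omega

theorem toFinset_dedup (t : List Int) : (PySem.List.dedup t).toFinset = t.toFinset := by
  ext v; simp

theorem foldl_items_sum (L : List (Int × Int)) (acc : Int) :
    L.foldl (fun acc p => if p.2 % 2 == 1 then acc + |p.1| else acc) acc =
      acc + (L.map (fun p => if p.2 % 2 == 1 then |p.1| else 0)).sum := by
  induction L generalizing acc with
  | nil => simp
  | cons p L ih => simp only [List.foldl_cons, List.map_cons, List.sum_cons, ih]; split <;> omega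

theorem max_diff_alt_eq_oddSum (arr : List Int) (n : Int) (h : n ≤ (arr.length : Int)) :
    max_diff_alt arr n = oddSum (arr.take n.toNat) := by
  by_cases hn : n ≤ 0
  · unfold max_diff_alt
    rw [PySem.List.pyRange_one_eq_nil hn]
    simp only [List.foldl_nil]
    rw [show PySem.Dict.empty.items = ([] : List (Int × Int)) from rfl]
    simp [oddSum, Int.toNat_of_nonpos hn]
  · rw [not_le] at hn
    have hlt : ((arr.take n.toNat).length : Int) = n := by simp; omega
    have hcounter : (PySem.List.pyRange 0 n 1).foldl
        (fun (d : PySem.Dict Int Int) i =>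
          d.insert (PySem.List.pyGetD arr i 0) (d.getD (PySem.List.pyGetD arr i 0) 0 + 1))
        PySem.Dict.empty
      = PySem.Dict.counter (arr.take n.toNat) := by
      have hcongr : (PySem.List.pyRange 0 n 1).foldl
          (fun (d : PySem.Dict Int Int) i =>
            d.insert (PySem.List.pyGetD arr i 0) (d.getD (PySem.List.pyGetD arr i 0) 0 + 1))
          PySem.Dict.empty
        = (PySem.List.pyRange 0 n 1).foldl
          (fun (d : PySem.Dict Int Int) i =>
            d.insert (PySem.List.pyGetD (arr.take n.toNat) i 0)
              (d.getD (PySem.List.pyGetD (arr.take n.toNat) i 0) 0 + 1))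
          PySem.Dict.empty := by
        refine PySem.List.foldl_congr_mem _ _ _ _ (fun acc j hj => ?_)
        have hj' := PySem.List.mem_pyRange_one.mp hj
        have e : PySem.List.pyGetD arr j 0 = PySem.List.pyGetD (arr.take n.toNat) j 0 := by
          rw [PySem.List.pyGetD_eq_getElem arr 0 (by omega) (by omega),
              PySem.List.pyGetD_eq_getElem (arr.take n.toNat) 0 (by omega) (by rw [hlt]; omega)]
          simp [List.getElem_take]
        simp only [e]
      have step := PySem.List.foldl_pyRange_zero_pyGetD' (arr.take n.toNat) (0:Int)
          (fun (d : PySem.Dict Int Int) x => d.insert x (d.getD x 0 + 1)) PySem.Dict.empty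
      rw [hlt] at step
      exact hcongr.trans (step.trans (PySem.Dict.foldl_insert_getD_add_one_eq_counter _))
    simp only [max_diff_alt]
    rw [hcounter]
    set t := arr.take n.toNat with ht
    rw [PySem.Dict.items_counter, foldl_items_sum, List.map_map]
    have e1 : ((fun (p : Int × Int) => if p.2 % 2 == 1 then |p.1| else 0)
          ∘ fun k => (k, (t.count k : Int)))
        = fun k => if t.count k % 2 = 1 then |k| else 0 := by
      funext k
      simp only [Function.comp_apply, intmod2]
      simp
    rw [e1]
    have e2 : (PySem.Set.ofList t : List Int) = PySem.List.dedup t := by simp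
    rw [e2]
    have e3 := List.sum_toFinset (fun k : Int => if t.count k % 2 = 1 then |k| else 0)
      (PySem.List.nodup_dedup t)
    rw [toFinset_dedup] at e3
    rw [← e3, oddSum]
    omega

-- ===== VERDICT (by name: the statement is the Claim_ definition above) =====
theorem max_diff_spec : Claim_equal_max_diff := by
  intro arr n _ hpre
  unfold Spec_max_diff
  rw [max_diff_eq_pairOff arr n hpre, max_diff_alt_eq_oddSum arr n hpre, pairOff_eq_oddSum]
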